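-- pv_equiv track=rewrite | github.com/Ananth1-9/CSC-110 | Short Programming Projects/count_names.py | count_names
-- ===== SOURCE A (Python) =====
-- def count_names(my_list):
--     name_counts = {}
--     for item in my_list:
--         # Per the lab hint, if the first character is not numeric,
--         # it's a name.
--         if item and (not item[0].isnumeric()):
--             if item in name_counts:
--                 name_counts[item] += 1
--             else:
--                 name_counts[item] = 1
--     return name_counts
-- ===== SOURCE B (Python) =====
-- def count_names(my_list):
--     # Sort-then-group: filter qualifying names, sort them, tally each consecutive
--     # run once, then emit the dict in first-occurrence order via an ordered dedup.
--     names = [item for item in my_list if item and not item[0].isnumeric()]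
--     counts = {}
--     s = sorted(names)
--     i = 0
--     while i < len(s):
--         j = i + 1
--         while j < len(s) and s[j] == s[i]:
--             j += 1
--         counts[s[i]] = j - i
--         i = j
--     return {name: counts.get(name, 0) for name in dict.fromkeys(names)}
-- ===== Notes on version B (the rewrite author's own statement) =====
-- stated objective: alternative
-- what changed: Replaces the incremental dict tally with sort-then-group-runs: filter the qualifying names, sort them, record each consecutive run's length in one linear scan, then emit the dict in first-occurrence order via an ordered dedup.
import Mathlib
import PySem

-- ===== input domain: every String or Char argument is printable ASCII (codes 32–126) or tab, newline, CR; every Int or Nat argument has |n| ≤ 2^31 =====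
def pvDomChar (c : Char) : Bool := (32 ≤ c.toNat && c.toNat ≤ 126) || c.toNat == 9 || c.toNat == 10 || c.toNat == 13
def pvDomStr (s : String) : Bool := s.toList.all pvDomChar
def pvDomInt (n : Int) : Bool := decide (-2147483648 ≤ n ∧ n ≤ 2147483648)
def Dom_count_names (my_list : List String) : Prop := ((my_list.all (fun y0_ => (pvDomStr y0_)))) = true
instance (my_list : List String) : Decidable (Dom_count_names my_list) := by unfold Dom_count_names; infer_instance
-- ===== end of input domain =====

-- B: sort-then-group-runs (filter, sort, tally consecutive runs, emit in first-occurrence order) instead of A's incremental dict tally; same return value.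
-- ===== PORT A =====
-- shared helper: Python 'item and not item[0].isnumeric()' (isnumeric = isdigit on the ASCII domain)
def pvIsName (s : String) : Bool :=
  match s.toList with
  | [] => false
  | c :: _ => !PySem.Chars.isdigit c

def count_names (my_list : List String) : List (String × Int) :=
  (my_list.foldl (fun d item =>
      if pvIsName item then
        if d.contains item then d.modify item 0 (· + 1) else d.insert item 1
      else d)
    (PySem.Dict.empty : PySem.Dict String Int)).items

-- ===== PORT B =====
-- the outer while loop over the sorted list: each step consumes one run s[i..j) and records its length
def pvRunTally : List String → PySem.Dict String Int → PySem.Dict String Int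
  | [], counts => counts
  | x :: rest, counts =>
      pvRunTally (rest.dropWhile (· == x))
        (counts.insert x (1 + ((rest.takeWhile (· == x)).length : Int)))
termination_by s _ => s.length
decreasing_by
  exact Nat.lt_succ_of_le (List.length_dropWhile_le _ _)

def count_names_alt (my_list : List String) : List (String × Int) :=
  (PySem.List.dedup (my_list.filter pvIsName)).map
    (fun k => (k, (pvRunTally (PySem.List.sorted (my_list.filter pvIsName) (fun x => x) false)
                    PySem.Dict.empty).getD k 0))

-- ===== PRECONDITION & SPEC =====
def Spec_count_names (my_list : List String) (out : List (String × Int)) : Prop := out = count_names_alt my_list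
instance (my_list : List String) (out : List (String × Int)) : Decidable (Spec_count_names my_list out) := by unfold Spec_count_names; infer_instance

-- ===== CLAIM (what is proved, stated in full; the proofs are below) =====
def Claim_equal_count_names : Prop := ∀ (my_list : List String), Dom_count_names my_list → Spec_count_names my_list (count_names my_list)

-- ===== LEMMAS AND PROOFS =====

lemma runTally_getD (s : List String) (d : PySem.Dict String Int)
    (hs : s.Pairwise (· ≤ ·)) (k : String) :
    (pvRunTally s d).getD k 0 = if k ∈ s then (s.count k : Int) else d.getD k 0 := by
  induction s, d using pvRunTally.induct with
  | case1 d => simp [pvRunTally]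
  | case2 x rest d ih =>
      have hsplit : rest.takeWhile (· == x) ++ rest.dropWhile (· == x) = rest :=
        List.takeWhile_append_dropWhile
      have ht : ∀ y ∈ rest.takeWhile (· == x), y = x := by
        intro y hy
        have := List.mem_takeWhile_imp hy
        simpa using this
      have hrestp : rest.Pairwise (· ≤ ·) := hs.of_cons
      have hup : (rest.dropWhile (· == x)).Pairwise (· ≤ ·) :=
        hrestp.sublist (List.dropWhile_sublist _)
      have hxle : ∀ y ∈ rest, x ≤ y := fun y hy => (List.pairwise_cons.mp hs).1 y hy
      -- x does not occur in the dropped suffix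
      have hxu : x ∉ rest.dropWhile (· == x) := by
        intro hmem
        cases hu : rest.dropWhile (· == x) with
        | nil => rw [hu] at hmem; exact absurd hmem (List.not_mem_nil)
        | cons h tl =>
            have hhx : ¬ (h == x) = true := by
              have := List.head_dropWhile_not (· == x) (l := rest) (by rw [hu]; simp)
              simpa [hu] using this
            have hhne : h ≠ x := by simpa using hhx
            have hh_mem : h ∈ rest := (List.dropWhile_sublist _ ).mem (by rw [hu]; simp)
            have hxh : x ≤ h := hxle h hh_mem
            rw [hu] at hmem
            rcases List.mem_cons.mp hmem with rfl | hmem'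
            · exact hhne rfl
            · have hhxle : h ≤ x := by
                have := (List.pairwise_cons.mp (by rw [hu] at hup; exact hup)).1 x hmem'
                exact this
              exact hhne (le_antisymm hhxle hxh)
      have hcu0 : (rest.dropWhile (· == x)).count x = 0 :=
        List.count_eq_zero.mpr hxu
      have hct : (rest.takeWhile (· == x)).count x = (rest.takeWhile (· == x)).length := by
        rw [List.count_eq_length]
        intro y hy
        simp [ht y hy]
      have hcx : ((x :: rest).count x : Int) = 1 + ((rest.takeWhile (· == x)).length : Int) := by
        rw [List.count_cons_self]
        have : rest.count x = (rest.takeWhile (· == x)).length := by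
          conv_lhs => rw [← hsplit]
          rw [List.count_append, hcu0, hct]
          omega
        omega
      rw [pvRunTally, ih hup]
      by_cases hku : k ∈ rest.dropWhile (· == x)
      · have hkx : k ≠ x := fun h => hxu (h ▸ hku)
        have hks : k ∈ x :: rest := by
          refine List.mem_cons.mpr (Or.inr ?_)
          exact (List.dropWhile_sublist _).mem hku
        have hkt : k ∉ rest.takeWhile (· == x) := fun h => hkx (ht k h)
        have h0 : (rest.takeWhile (· == x)).count k = 0 := List.count_eq_zero.mpr hkt
        have hcnt : (x :: rest).count k = (rest.dropWhile (· == x)).count k := by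
          have hr : rest.count k = (rest.dropWhile (· == x)).count k := by
            conv_lhs => rw [← hsplit]
            rw [List.count_append, h0]
            omega
          rw [List.count_cons, hr, if_neg (by simp [hkx.symm])]
          omega
        simp [hku, hks, hcnt]
      · by_cases hkx : k = x
        · subst hkx
          rw [if_neg hku, PySem.Dict.getD_insert_self, if_pos (by simp)]
          exact hcx.symm
        · have hks : k ∉ x :: rest := by
            intro hk
            rcases List.mem_cons.mp hk with h | h
            · exact hkx h
            · rw [← hsplit] at h
              rcases List.mem_append.mp h with h | h
              · exact hkx (ht k h)
              · exact hku h
          rw [if_neg hku, if_neg hks, PySem.Dict.getD_insert, if_neg hkx]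

lemma modify_absent (d : PySem.Dict String Int) (x : String) (h : d.contains x = false) :
    d.modify x 0 (· + 1) = d.insert x 1 := by
  simp only [PySem.Dict.modify]
  rw [PySem.Dict.getD_of_not_contains]
  · norm_num
  · exact h

lemma foldA_eq_counter_fold (my_list : List String) (d : PySem.Dict String Int) :
    my_list.foldl (fun d item =>
      if pvIsName item then
        if d.contains item then d.modify item 0 (· + 1) else d.insert item 1
      else d) d
    = (my_list.filter pvIsName).foldl (fun d x => d.modify x 0 (· + 1)) d := by
  induction my_list generalizing d with
  | nil => rfl
  | cons a l ih =>
      by_cases ha : pvIsName a = true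
      · rw [List.foldl_cons, List.filter_cons_of_pos (by simp [ha]), List.foldl_cons, if_pos ha]
        by_cases hc : d.contains a = true
        · rw [if_pos hc, ih]
        · rw [if_neg hc, modify_absent d a (by simpa using hc), ih]
      · rw [List.foldl_cons, List.filter_cons_of_neg (by simp [ha]), if_neg ha, ih]

-- ===== VERDICT (by name: the statement is the Claim_ definition above) =====
theorem count_names_spec : Claim_equal_count_names := by
  intro my_list _
  unfold Spec_count_names count_names count_names_alt
  rw [foldA_eq_counter_fold, ← PySem.Dict.counter_eq_foldl, PySem.Dict.items_counter,
    ← PySem.List.dedup_eq_ofList]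
  apply List.map_congr_left
  intro k hk
  have hkn : k ∈ my_list.filter pvIsName := by
    rw [PySem.List.dedup_eq_ofList] at hk
    exact (PySem.Set.mem_ofList _ _).mp hk
  have hperm : (PySem.List.sorted (my_list.filter pvIsName) (fun x => x) false).Perm
      (my_list.filter pvIsName) := PySem.List.sorted_perm _ _ _
  rw [runTally_getD _ _ (by simpa using PySem.List.sorted_pairwise (my_list.filter pvIsName) (fun x => x)) k,
    if_pos (hperm.mem_iff.mpr hkn), hperm.count_eq]
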